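-- pv_equiv track=rewrite | github.com/tutejshy/vfs_telegram_bot | app/util/util.py | change_order_data
-- ===== SOURCE A (Python) =====
-- from typing import Optional, Any, List, Dict
--
-- def change_order_data(stored: Dict[str, Dict[str, Dict[str, int]]]) -> Dict[str, Dict[str, Dict[str, int]]]:
--     data = {}
--     for center, date_dict in stored.items():
--         group = data.get(center)
--         if not group:
--             data[center] = group = {}
--
--         for date, category_dict in date_dict.items():
--             for category, slots in category_dict.items():
--                 visa_category = group.get(category)
--                 if not visa_category:
--                     group[category] = visa_category = {}
--                 date_slot = visa_category.get(date)
--                 if not date_slot: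
--                     visa_category[date] = 0
--                 visa_category[date] += slots
--
--     return data
-- ===== SOURCE B (Python) =====
-- def change_order_data(stored):
--     data = {}
--     for center, date_dict in stored.items():
--         triples = [(category, date, slots)
--                    for date, category_dict in date_dict.items()
--                    for category, slots in category_dict.items()]
--         categories = dict.fromkeys(cat for cat, _date, _slots in triples)
--         data[center] = {cat: {date: slots for c, date, slots in triples if c == cat}
--                         for cat in categories}
--     return data
-- ===== Notes on version B (the rewrite author's own statement) =====
-- stated objective: alternative
-- what changed: B flattens each center's two nested dicts into one list of (category, date, slots) triples, then rebuilds the swapped nesting from that list by an ordered key dedup plus a per-category filter comprehension, instead of A's inline three-level get/insert re-nesting with falsy checks.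
import Mathlib
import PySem

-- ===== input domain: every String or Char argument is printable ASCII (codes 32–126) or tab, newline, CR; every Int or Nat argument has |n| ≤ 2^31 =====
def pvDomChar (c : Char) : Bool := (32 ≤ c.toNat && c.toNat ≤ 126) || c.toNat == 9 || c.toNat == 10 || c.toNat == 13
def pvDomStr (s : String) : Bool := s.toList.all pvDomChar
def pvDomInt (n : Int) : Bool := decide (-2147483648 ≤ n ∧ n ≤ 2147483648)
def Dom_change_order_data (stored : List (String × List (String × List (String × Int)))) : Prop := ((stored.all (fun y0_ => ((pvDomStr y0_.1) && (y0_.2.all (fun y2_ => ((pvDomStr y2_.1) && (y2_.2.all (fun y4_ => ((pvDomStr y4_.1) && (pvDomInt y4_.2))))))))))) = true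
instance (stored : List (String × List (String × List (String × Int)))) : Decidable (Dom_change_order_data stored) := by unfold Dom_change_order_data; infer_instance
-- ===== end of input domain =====

-- B re-nests via flatten-to-triples + ordered dedup + per-category filter instead of A's inline
-- three-level get/insert re-nesting; objective: alternative decomposition (same cost class).
-- Equivalence is about the RETURN value (the Python functions mutate only their own fresh dicts).

-- ===== PORT A =====
-- innermost body of A's loops: the category/date assignment with its falsy checks
def stepA (group : PySem.Dict String (PySem.Dict String Int)) (date category : String) (slots : Int) : PySem.Dict String (PySem.Dict String Int) :=
  let visa_category :=
    match group.get? category with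
    | none => PySem.Dict.empty          -- visa_category = None is falsy → group[category] = {}
    | some v => if v.items.isEmpty then PySem.Dict.empty else v   -- empty dict is falsy too
  let visa_category :=
    match visa_category.get? date with
    | none => visa_category.insert date 0
    | some v => if v = 0 then visa_category.insert date 0 else visa_category  -- 0 is falsy
  let visa_category := visa_category.insert date (visa_category.getD date 0 + slots)
  -- Python mutates the aliased dicts in place; the final write-back (insert overwrites in
  -- place, new keys append) renders the loop body's net effect on `group` exactly
  group.insert category visa_category

def change_order_data (stored : List (String × List (String × List (String × Int)))) : List (String × List (String × List (String × Int))) :=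
  let data : PySem.Dict String (PySem.Dict String (PySem.Dict String Int)) :=
    stored.foldl (fun data cd =>
      let group :=
        match data.get? cd.1 with
        | none => PySem.Dict.empty
        | some g => if g.items.isEmpty then PySem.Dict.empty else g
      let group := cd.2.foldl (fun group dc =>
        dc.2.foldl (fun group cs => stepA group dc.1 cs.1 cs.2) group) group
      data.insert cd.1 group) PySem.Dict.empty
  data.items.map (fun p => (p.1, p.2.items.map (fun q => (q.1, q.2.items))))

-- ===== PORT B =====
-- the flattening comprehension: [(category, date, slots) for date, cd in date_dict.items() for category, slots in cd.items()]
def pvTriples (date_dict : List (String × List (String × Int))) : List (String × String × Int) :=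
  date_dict.flatMap (fun dc => dc.2.map (fun cs => (cs.1, dc.1, cs.2)))

-- one center's rebuilt group: dict.fromkeys = PySem.List.dedup; the inner dict comprehension is
-- ported as a plain pair list (exact under Pre_, where no duplicate (category, date) can occur)
def pvGroupB (date_dict : List (String × List (String × Int))) : List (String × List (String × Int)) :=
  let triples := pvTriples date_dict
  let categories := PySem.List.dedup (triples.map (fun t => t.1))
  categories.map (fun c => (c, (triples.filter (fun t => t.1 == c)).map (fun t => (t.2.1, t.2.2))))

def change_order_data_alt (stored : List (String × List (String × List (String × Int)))) : List (String × List (String × List (String × Int))) :=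
  let data : PySem.Dict String (List (String × List (String × Int))) :=
    stored.foldl (fun data cd => data.insert cd.1 (pvGroupB cd.2)) PySem.Dict.empty
  data.items

-- ===== PRECONDITION & SPEC =====
-- Pre_ excludes association lists with duplicate keys at some nesting level: A's argument is a
-- Python dict of dicts, where duplicate keys cannot occur (building such a dict collapses them).
def Pre_change_order_data (stored : List (String × List (String × List (String × Int)))) : Prop :=
  (stored.map (fun p => p.1)).Nodup ∧
  ∀ p ∈ stored, (p.2.map (fun q => q.1)).Nodup ∧ ∀ q ∈ p.2, (q.2.map (fun r => r.1)).Nodup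
instance (stored : List (String × List (String × List (String × Int)))) : Decidable (Pre_change_order_data stored) := by unfold Pre_change_order_data; infer_instance

def pvWitness_change_order_data : (List (String × List (String × List (String × Int)))) :=
  [("centre", [("2024-01-01", [("visa", 2), ("work", 0)]), ("2024-01-02", [("visa", 3)])]), ("other", [])]

def Spec_change_order_data (stored : List (String × List (String × List (String × Int)))) (out : List (String × List (String × List (String × Int)))) : Prop := out = change_order_data_alt stored
instance (stored : List (String × List (String × List (String × Int)))) (out : List (String × List (String × List (String × Int)))) : Decidable (Spec_change_order_data stored out) := by unfold Spec_change_order_data; infer_instance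

-- ===== CLAIM (what is proved, stated in full; the proofs are below) =====
def Claim_equal_change_order_data : Prop := ∀ (stored : List (String × List (String × List (String × Int)))), Dom_change_order_data stored → Pre_change_order_data stored → Spec_change_order_data stored (change_order_data stored)

-- ===== LEMMAS AND PROOFS =====

-- the inner double loop of A, folded over the flattened triples
def stepT (g : PySem.Dict String (PySem.Dict String Int)) (t : String × String × Int) : PySem.Dict String (PySem.Dict String Int) :=
  stepA g t.2.1 t.1 t.2.2

def pairOf (t : String × String × Int) : String × String := (t.1, t.2.1)

-- L0: A's two nested loops over date_dict are one loop over the flattened triples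
theorem foldl_triples (dd : List (String × List (String × Int))) (g : PySem.Dict String (PySem.Dict String Int)) :
    dd.foldl (fun group dc => dc.2.foldl (fun group cs => stepA group dc.1 cs.1 cs.2) group) g
      = (pvTriples dd).foldl stepT g := by
  induction dd generalizing g with
  | nil => rfl
  | cons dc rest ih =>
      simp only [List.foldl_cons, pvTriples, List.flatMap_cons, List.foldl_append, ih, List.foldl_map]
      rfl

-- per-category dates are distinct when the (category, date) pairs are
theorem filter_dates_nodup (ts : List (String × String × Int)) (h : (ts.map pairOf).Nodup) (c : String) :
    ((ts.filter (fun t => t.1 == c)).map (fun t => t.2.1)).Nodup := by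
  have hsub : ((ts.filter (fun t => t.1 == c)).map pairOf).Nodup :=
    (List.Sublist.map pairOf List.filter_sublist).nodup h
  have heq : (ts.filter (fun t => t.1 == c)).map pairOf
      = ((ts.filter (fun t => t.1 == c)).map (fun t => t.2.1)).map (fun d => (c, d)) := by
    rw [List.map_map]
    apply List.map_congr_left
    intro t ht
    have : t.1 = c := by simpa using (List.mem_filter.mp ht).2
    simp [pairOf, this]
  rw [heq] at hsub
  exact hsub.of_map _


-- L1 (heart): the triple fold from the empty dict builds exactly B's dedup + filter structure
theorem fold_stepT_items (ts : List (String × String × Int)) (h : (ts.map pairOf).Nodup) :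
    (ts.foldl stepT PySem.Dict.empty).items
      = (PySem.Set.ofList (ts.map (fun t => t.1))).map
          (fun c => (c, PySem.Dict.mk ((ts.filter (fun t => t.1 == c)).map (fun t => (t.2.1, t.2.2))))) := by
  induction ts using List.reverseRecOn with
  | nil => rfl
  | append_singleton ts t ih =>
      -- split the nodup hypothesis
      rw [List.map_append] at h
      have hts : (ts.map pairOf).Nodup := h.of_append_left
      have hnotin : pairOf t ∉ ts.map pairOf := by
        have := List.nodup_append.mp h
        intro hmem
        exact this.2.2 _ hmem _ (by simp) rfl
      have hG := ih hts
      set G := ts.foldl stepT PySem.Dict.empty with hGdef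
      set cats := PySem.Set.ofList (ts.map (fun t => t.1)) with hcats
      have hkeys : G.keys = cats := by
        simp only [PySem.Dict.keys, hG, List.map_map]
        simp only [Function.comp_def]
        simp
      have hnodcats : List.Nodup cats := PySem.Set.nodup_ofList _
      have hofl : PySem.Set.ofList ((ts ++ [t]).map (fun t => t.1))
          = PySem.Set.add cats (t.1) := by
        rw [hcats, PySem.Set.ofList_eq_foldl, PySem.Set.ofList_eq_foldl,
            List.map_append, List.foldl_append]
        rfl
      rw [List.foldl_append, List.foldl_cons, List.foldl_nil, hofl]
      by_cases hmem : t.1 ∈ ts.map (fun t => t.1)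
      · -- category already present: the inner date dict gains one appended entry
        have hmemc : t.1 ∈ cats := (PySem.Set.mem_ofList _ _).mpr hmem
        set M := (ts.filter (fun u => u.1 == t.1)).map (fun u => (u.2.1, u.2.2)) with hM
        have hitem : (t.1, PySem.Dict.mk M) ∈ G.items := by
          rw [hG]; exact List.mem_map_of_mem hmemc
        have hknG : G.keys.Nodup := by rw [hkeys]; exact hnodcats
        have hget : G.get? t.1 = some (PySem.Dict.mk M) :=
          PySem.Dict.get?_of_mem_items _ hitem hknG
        have hMne : M ≠ [] := by
          obtain ⟨u, hu, hu1⟩ := List.mem_map.mp hmem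
          simp only [hM, ne_eq, List.map_eq_nil_iff, List.filter_eq_nil_iff, not_forall]
          exact ⟨u, ⟨hu, by simp [hu1]⟩⟩
        have hie : M.isEmpty = false := by
          cases hMM : M with
          | nil => exact absurd hMM hMne
          | cons a l => rfl
        have hMf : M.map (fun p => p.1) = (ts.filter (fun u => u.1 == t.1)).map (fun u => u.2.1) := by
          rw [hM, List.map_map]; rfl
        have hdnotin : t.2.1 ∉ M.map (fun p => p.1) := by
          rw [hMf]
          intro hd
          obtain ⟨u, hu, hud⟩ := List.mem_map.mp hd
          have hu' := List.mem_filter.mp hu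
          apply hnotin
          refine List.mem_map.mpr ⟨u, hu'.1, ?_⟩
          have hu1 : u.1 = t.1 := by simpa using hu'.2
          simp [pairOf, hu1, hud]
        have hvcget : (PySem.Dict.mk M).get? t.2.1 = none := by
          rw [PySem.Dict.get?_eq_none_iff_not_mem_keys]
          exact hdnotin
        have hcon1 : (PySem.Dict.mk M).contains t.2.1 = false := by
          cases hc : (PySem.Dict.mk M).contains t.2.1
          · rfl
          · exact absurd ((PySem.Dict.contains_iff_mem_keys _ _).mp hc) hdnotin
        have hins1 : ((PySem.Dict.mk M).insert t.2.1 0) = PySem.Dict.mk (M ++ [(t.2.1, 0)]) := by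
          apply PySem.Dict.ext
          rw [PySem.Dict.items_insert_of_not_contains _ _ hcon1]
        have hMfn : (M.map (fun p => p.1)).Nodup := by
          rw [hMf]; exact filter_dates_nodup ts hts t.1
        have hkeys1 : (PySem.Dict.mk (M ++ [(t.2.1, 0)])).keys.Nodup := by
          have : (PySem.Dict.mk (M ++ [(t.2.1, 0)])).keys = M.map (fun p => p.1) ++ [t.2.1] := by
            simp [PySem.Dict.keys]
          rw [this, List.nodup_append]
          exact ⟨hMfn, List.nodup_singleton _, by
            intro a ha b hb
            simp only [List.mem_singleton] at hb
            subst hb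
            exact fun he => hdnotin (he ▸ ha)⟩
        have hg1 : (PySem.Dict.mk (M ++ [(t.2.1, 0)])).getD t.2.1 0 = 0 :=
          PySem.Dict.getD_of_mem_items _ (by simp) hkeys1 0
        have hcon2 : (PySem.Dict.mk (M ++ [(t.2.1, 0)])).contains t.2.1 = true :=
          (PySem.Dict.contains_iff_mem_keys _ _).mpr (by simp [PySem.Dict.keys])
        have hrepl : ∀ p ∈ M, (if (p.1 == t.2.1) = true then (t.2.1, 0 + t.2.2) else p) = p := by
          intro p hp
          have : p.1 ≠ t.2.1 := fun he => hdnotin (List.mem_map.mpr ⟨p, hp, he⟩)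
          simp [this]
        have hins2 : (PySem.Dict.mk (M ++ [(t.2.1, 0)])).insert t.2.1 (0 + t.2.2)
            = PySem.Dict.mk (M ++ [(t.2.1, t.2.2)]) := by
          apply PySem.Dict.ext
          rw [PySem.Dict.items_insert_of_contains _ _ hcon2]
          show (M ++ [(t.2.1, 0)]).map _ = M ++ [(t.2.1, t.2.2)]
          rw [List.map_append, List.map_congr_left hrepl]
          simp
        have hstep : stepT G t = G.insert t.1 (PySem.Dict.mk (M ++ [(t.2.1, t.2.2)])) := by
          simp only [stepT, stepA, hget, hie, Bool.false_eq_true, if_false, hvcget, hins1, hg1, hins2]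
        have hconG : G.contains t.1 = true :=
          (PySem.Dict.contains_iff_mem_keys _ _).mpr (by rw [hkeys]; exact hmemc)
        have haddeq : cats.add t.1 = cats := by
          simp [PySem.Set.add, PySem.Set.contains, hmemc]
        rw [hstep, PySem.Dict.items_insert_of_contains _ _ hconG, hG, haddeq, List.map_map]
        apply List.map_congr_left
        intro c hc
        by_cases hceq : c = t.1
        · have hbe : ((c : String) == t.1) = true := by simp [hceq]
          have hbt2 : ((t.1 : String) == c) = true := by simp [hceq]
          have hfil : (ts ++ [t]).filter (fun u => u.1 == c) = ts.filter (fun u => u.1 == c) ++ [t] := by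
            rw [List.filter_append]; simp [hbt2]
          simp only [Function.comp_apply, hbe, if_true, hfil, List.map_append]
          rw [hceq, ← hM]
          rfl
        · have hbe : ((c : String) == t.1) = false := by simpa using hceq
          have hbt : (t.1 == c) = false := by simpa using (Ne.symm hceq)
          have hfil : (ts ++ [t]).filter (fun u => u.1 == c) = ts.filter (fun u => u.1 == c) := by
            rw [List.filter_append]; simp [hbt]
          simp only [Function.comp_apply, hbe, Bool.false_eq_true, if_false, hfil]
      · -- new category: appended at the end
        have hnmemc : t.1 ∉ cats := fun hc => hmem ((PySem.Set.mem_ofList _ _).mp hc)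
        have hget : G.get? t.1 = none := by
          rw [PySem.Dict.get?_eq_none_iff_not_mem_keys, hkeys]; exact hnmemc
        have hins1 : (PySem.Dict.empty.insert t.2.1 (0 : Int)) = PySem.Dict.mk [(t.2.1, 0)] := by
          apply PySem.Dict.ext
          rw [PySem.Dict.items_insert_of_not_contains _ _ (PySem.Dict.contains_empty _)]
          rfl
        have hkeys1 : (PySem.Dict.mk [(t.2.1, (0:Int))]).keys.Nodup := by simp [PySem.Dict.keys]
        have hg1 : (PySem.Dict.mk [(t.2.1, (0:Int))]).getD t.2.1 0 = 0 :=
          PySem.Dict.getD_of_mem_items _ (by simp) hkeys1 0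
        have hcon2 : (PySem.Dict.mk [(t.2.1, (0:Int))]).contains t.2.1 = true :=
          (PySem.Dict.contains_iff_mem_keys _ _).mpr (by simp [PySem.Dict.keys])
        have hins2 : (PySem.Dict.mk [(t.2.1, (0:Int))]).insert t.2.1 (0 + t.2.2) = PySem.Dict.mk [(t.2.1, t.2.2)] := by
          apply PySem.Dict.ext
          rw [PySem.Dict.items_insert_of_contains _ _ hcon2]
          simp
        have hstep : stepT G t = G.insert t.1 (PySem.Dict.mk [(t.2.1, t.2.2)]) := by
          simp only [stepT, stepA, hget, PySem.Dict.get?_empty, hins1, hg1, hins2]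
        have hconG : G.contains t.1 = false := by
          cases hc : G.contains t.1
          · rfl
          · rw [PySem.Dict.contains_iff_mem_keys, hkeys] at hc
            exact absurd hc hnmemc
        have haddeq : cats.add t.1 = cats ++ [t.1] := by
          simp [PySem.Set.add, PySem.Set.contains, hnmemc]
        rw [hstep, PySem.Dict.items_insert_of_not_contains _ _ hconG, hG, haddeq, List.map_append]
        congr 1
        · apply List.map_congr_left
          intro c hc
          have hbt : (t.1 == c) = false := by
            have hne : t.1 ≠ c := fun he => hnmemc (he ▸ hc)
            simpa using hne
          have hfil : (ts ++ [t]).filter (fun u => u.1 == c) = ts.filter (fun u => u.1 == c) := by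
            rw [List.filter_append]; simp [hbt]
          simp [hfil]
        · simp
          exact fun a a1 b hab he => hmem (List.mem_map.mpr ⟨(a, a1, b), hab, he⟩)


-- the flattened triples have nodup (category, date) pairs under Pre_'s nested nodups
theorem triples_pairs_nodup (dd : List (String × List (String × Int)))
    (h1 : (dd.map (fun q => q.1)).Nodup) (h2 : ∀ q ∈ dd, (q.2.map (fun r => r.1)).Nodup) :
    ((pvTriples dd).map pairOf).Nodup := by
  induction dd with
  | nil => simp [pvTriples]
  | cons dc rest ih =>
      simp only [pvTriples, List.flatMap_cons, List.map_append, List.map_map] at *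
      rw [List.nodup_append]
      refine ⟨?_, ?_, ?_⟩
      · have heq : (dc.2.map (pairOf ∘ fun cs => (cs.1, dc.1, cs.2)))
            = (dc.2.map (fun r => r.1)).map (fun a => (a, dc.1)) := by
          simp [List.map_map, pairOf, Function.comp]
        rw [heq]
        exact (h2 dc (by simp)).map (fun a b hab => by simpa using congrArg Prod.fst hab)
      · exact ih h1.of_cons (fun q hq => h2 q (List.mem_cons_of_mem _ hq))
      · intro x hx y hy
        simp only [List.mem_map, Function.comp] at hx
        obtain ⟨cs, _, rfl⟩ := hx
        simp only [List.mem_map, List.mem_flatMap] at hy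
        obtain ⟨t, ⟨q, hq, cs', _, rfl⟩, rfl⟩ := hy
        intro hxy
        have h2nd : dc.1 = q.1 := by simpa [pairOf] using congrArg Prod.snd hxy
        have : dc.1 ∈ rest.map (fun q => q.1) := List.mem_map.mpr ⟨q, hq, h2nd.symm⟩
        exact (List.nodup_cons.mp h1).1 this


-- per-center equality: A's group, converted to lists, is B's group
theorem group_eq (dd : List (String × List (String × Int)))
    (h1 : (dd.map (fun q => q.1)).Nodup) (h2 : ∀ q ∈ dd, (q.2.map (fun r => r.1)).Nodup) :
    ((dd.foldl (fun group dc => dc.2.foldl (fun group cs => stepA group dc.1 cs.1 cs.2) group) PySem.Dict.empty).items.map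
        (fun q => (q.1, q.2.items)))
      = pvGroupB dd := by
  rw [foldl_triples, fold_stepT_items _ (triples_pairs_nodup dd h1 h2), List.map_map]
  rfl

-- A's outer loop over fresh centers appends one finished group per center
theorem foldA_items (stored : List (String × List (String × List (String × Int))))
    (data : PySem.Dict String (PySem.Dict String (PySem.Dict String Int)))
    (hfresh : ∀ p ∈ stored, data.contains p.1 = false) (hnd : (stored.map (fun p => p.1)).Nodup) :
    (stored.foldl (fun data cd =>
      let group :=
        match data.get? cd.1 with
        | none => PySem.Dict.empty
        | some g => if g.items.isEmpty then PySem.Dict.empty else g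
      let group := cd.2.foldl (fun group dc =>
        dc.2.foldl (fun group cs => stepA group dc.1 cs.1 cs.2) group) group
      data.insert cd.1 group) data).items
    = data.items ++ stored.map (fun cd => (cd.1,
        cd.2.foldl (fun group dc => dc.2.foldl (fun group cs => stepA group dc.1 cs.1 cs.2) group) PySem.Dict.empty)) := by
  induction stored generalizing data with
  | nil => simp
  | cons cd rest ih =>
      have hn : data.get? cd.1 = none := by
        rw [PySem.Dict.get?_eq_none_iff_not_mem_keys]
        intro hmem
        have := (PySem.Dict.contains_iff_mem_keys (d := data) (k := cd.1)).mpr hmem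
        rw [hfresh cd (by simp)] at this
        exact Bool.false_ne_true this
      simp only [List.foldl_cons, hn]
      rw [ih]
      · rw [PySem.Dict.items_insert_of_not_contains _ _ (hfresh cd (by simp))]
        simp
      · intro p hp
        rw [PySem.Dict.contains_insert]
        have hne : p.1 ≠ cd.1 := by
          intro he
          have : cd.1 ∈ rest.map (fun p => p.1) := List.mem_map.mpr ⟨p, hp, he⟩
          exact (List.nodup_cons.mp hnd).1 this
        simp [hne, hfresh p (List.mem_cons_of_mem _ hp)]
      · exact hnd.of_cons


-- ===== VERDICT (by name: the statement is the Claim_ definition above) =====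
theorem change_order_data_spec : Claim_equal_change_order_data := by
  intro stored _hdom hpre
  show change_order_data stored = change_order_data_alt stored
  simp only [change_order_data, change_order_data_alt]
  rw [foldA_items stored PySem.Dict.empty (fun p _ => PySem.Dict.contains_empty _) hpre.1,
      PySem.Dict.items_foldl_insert_fresh stored (fun cd => cd.1) (fun cd => pvGroupB cd.2)
        PySem.Dict.empty (fun p _ => PySem.Dict.contains_empty _) hpre.1]
  show ((stored.map _).map _) = [] ++ _
  rw [List.map_map, List.nil_append]
  apply List.map_congr_left
  intro cd hcd
  have h2 := hpre.2 cd hcd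
  show (cd.1, _) = (cd.1, pvGroupB cd.2)
  rw [← group_eq cd.2 h2.1 h2.2]
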